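-- pv_equiv track=rewrite | github.com/Pi4kur/py- | python_ex_newbie_repeat.py | SAC
-- ===== SOURCE A (Python) =====
-- def SAC(txt):
--     lst = list()
--     while len(txt) > 3:
--         lst.append(txt[-3:])
--         txt = txt[:-3]
--     lst.append(txt)
--     lst.reverse()
--     return ','.join(lst)
-- ===== SOURCE B (Python) =====
-- def SAC(txt):
--     r = len(txt) % 3 or 3
--     parts = [txt[:r]]
--     while r < len(txt):
--         parts.append(txt[r:r + 3])
--         r += 3
--     return ','.join(parts)
-- ===== Notes on version B (the rewrite author's own statement) =====
-- stated objective: faster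
-- what changed: B computes the first chunk's length in closed form (len % 3 or 3) and scans left-to-right appending constant-size 3-char slices, instead of A's loop that right-slices and re-copies the whole remaining prefix each iteration and reverses the chunk list at the end.
import Mathlib
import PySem

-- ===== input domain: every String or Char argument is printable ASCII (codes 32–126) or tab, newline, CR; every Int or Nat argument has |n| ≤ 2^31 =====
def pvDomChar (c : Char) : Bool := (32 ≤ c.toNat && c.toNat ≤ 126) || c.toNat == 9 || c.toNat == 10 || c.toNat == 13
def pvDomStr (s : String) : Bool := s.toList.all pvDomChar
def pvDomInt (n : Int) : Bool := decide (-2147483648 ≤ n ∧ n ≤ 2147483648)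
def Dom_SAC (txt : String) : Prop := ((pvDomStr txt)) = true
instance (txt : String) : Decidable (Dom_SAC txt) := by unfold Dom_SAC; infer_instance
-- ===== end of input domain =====

-- B groups the string into comma-separated 3-char chunks by a single forward scan after
-- computing the first chunk's length in closed form, instead of A's right-slicing + reverse.

-- ===== PORT A =====
-- A's while loop: while len(txt) > 3: lst.append(txt[-3:]); txt = txt[:-3]; then lst.append(txt).
-- Under the guard len(txt) > 3 the slices txt[-3:] and txt[:-3] are exactly
-- drop (len-3) and take (len-3) (PySem.List.slice_from_neg_natCast / slice_to_neg_natCast).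
def pySACloopA (txt : List Char) (lst : List (List Char)) : List (List Char) :=
  if txt.length > 3 then
    pySACloopA (txt.take (txt.length - 3)) (lst ++ [txt.drop (txt.length - 3)])
  else lst ++ [txt]
termination_by txt.length
decreasing_by simpa using by omega

def SAC (txt : String) : String :=
  -- lst.reverse(); return ','.join(lst)
  String.ofList (PySem.Chars.join [','] (pySACloopA txt.toList []).reverse)

-- ===== PORT B =====
-- while r < len(txt): parts.append(txt[r:r+3]); r += 3  (r ≥ 0 throughout, so the slices
-- txt[:r] and txt[r:r+3] are exactly take r and (drop r).take 3: PySem.List.slice_natCast_add).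
def pySACloopB (cs : List Char) (r : Nat) (parts : List (List Char)) : List (List Char) :=
  if r < cs.length then pySACloopB cs (r + 3) (parts ++ [(cs.drop r).take 3]) else parts
termination_by cs.length - r

def SAC_alt (txt : String) : String :=
  let cs := txt.toList
  -- r = len(txt) % 3 or 3
  let r := if cs.length % 3 = 0 then 3 else cs.length % 3
  String.ofList (PySem.Chars.join [','] (pySACloopB cs r [cs.take r]))

-- ===== PRECONDITION & SPEC =====
def Spec_SAC (txt : String) (out : String) : Prop := out = SAC_alt txt
instance (txt : String) (out : String) : Decidable (Spec_SAC txt out) := by unfold Spec_SAC; infer_instance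

-- ===== CLAIM (what is proved, stated in full; the proofs are below) =====
def Claim_equal_SAC : Prop := ∀ (txt : String), Dom_SAC txt → Spec_SAC txt (SAC txt)

-- ===== LEMMAS AND PROOFS =====

-- canonical chunking, grouped from the right
def chunk3 (cs : List Char) : List (List Char) :=
  if cs.length > 3 then
    chunk3 (cs.take (cs.length - 3)) ++ [cs.drop (cs.length - 3)]
  else [cs]
termination_by cs.length
decreasing_by simpa using by omega

theorem pySACloopA_eq (cs : List Char) (lst : List (List Char)) :
    pySACloopA cs lst = lst ++ (chunk3 cs).reverse := by
  fun_induction pySACloopA cs lst with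
  | case1 cs lst h ih =>
      rw [chunk3, if_pos h, ih]
      simp
  | case2 cs lst h =>
      rw [chunk3, if_neg h]
      simp

theorem pySACloopB_eq (cs : List Char) (r : Nat) (parts : List (List Char)) :
    pySACloopB cs r parts = parts ++ pySACloopB cs r [] := by
  by_cases h : r < cs.length
  · rw [pySACloopB.eq_def cs r parts, if_pos h, pySACloopB.eq_def cs r [], if_pos h,
      pySACloopB_eq cs (r + 3) (parts ++ [(cs.drop r).take 3]),
      pySACloopB_eq cs (r + 3) ([] ++ [(cs.drop r).take 3])]
    simp
  · rw [pySACloopB.eq_def cs r parts, if_neg h, pySACloopB.eq_def cs r [], if_neg h]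
    simp
termination_by cs.length - r
decreasing_by all_goals omega

-- the forward scan restricted to the first (length-3) characters drops exactly the last chunk
theorem pySACloopB_take (cs : List Char) (r : Nat)
    (hr : r ≤ cs.length - 3) (h3 : 3 < cs.length) (hm : (cs.length - r) % 3 = 0) :
    pySACloopB cs r [] =
      pySACloopB (cs.take (cs.length - 3)) r [] ++ [cs.drop (cs.length - 3)] := by
  by_cases hlt : r < cs.length - 3
  · have hr6 : r ≤ cs.length - 6 := by omega
    rw [pySACloopB.eq_def cs r [], if_pos (by omega),
      pySACloopB.eq_def (cs.take (cs.length - 3)) r [], if_pos (by simpa using by omega),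
      pySACloopB_eq cs (r + 3), pySACloopB_eq (cs.take (cs.length - 3)) (r + 3),
      pySACloopB_take cs (r + 3) (by omega) h3 (by omega)]
    have hchunk : ((cs.take (cs.length - 3)).drop r).take 3 = (cs.drop r).take 3 := by
      rw [List.drop_take]
      rw [List.take_take]
      congr 1
      omega
    simp [hchunk]
  · have hreq : r = cs.length - 3 := by omega
    subst hreq
    rw [pySACloopB.eq_def cs _ [], if_pos (by omega)]
    simp only [List.nil_append]
    rw [pySACloopB_eq cs (cs.length - 3 + 3),
      pySACloopB.eq_def cs (cs.length - 3 + 3) [], if_neg (by omega),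
      pySACloopB.eq_def (cs.take (cs.length - 3)) _ [], if_neg (by simp)]
    have htk : (cs.drop (cs.length - 3)).take 3 = cs.drop (cs.length - 3) :=
      List.take_of_length_le (by simp; omega)
    simp [htk]
termination_by cs.length - r
decreasing_by omega

-- B's chunk list is the canonical right-grouped chunking
theorem pySACloopB_chunk3 (cs : List Char) :
    pySACloopB cs (if cs.length % 3 = 0 then 3 else cs.length % 3)
      [cs.take (if cs.length % 3 = 0 then 3 else cs.length % 3)] = chunk3 cs := by
  rw [chunk3]
  set r := if cs.length % 3 = 0 then 3 else cs.length % 3 with hrdef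
  by_cases h : cs.length > 3
  · rw [if_pos h]
    have hrle : r ≤ cs.length - 3 := by rw [hrdef]; split <;> omega
    have hrsame : (if (cs.take (cs.length - 3)).length % 3 = 0 then 3
        else (cs.take (cs.length - 3)).length % 3) = r := by
      have hlen : (cs.take (cs.length - 3)).length = cs.length - 3 := by simp
      rw [hlen, hrdef]
      have h3 : (cs.length - 3) % 3 = cs.length % 3 := by omega
      rw [h3]
    have htake : (cs.take (cs.length - 3)).take r = cs.take r := by
      rw [List.take_take]
      congr 1
      omega
    have hrec := pySACloopB_chunk3 (cs.take (cs.length - 3))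
    rw [hrsame, htake] at hrec
    rw [← hrec, pySACloopB_eq cs r, pySACloopB_eq (cs.take (cs.length - 3)) r,
      pySACloopB_take cs r hrle h (by rw [hrdef]; split <;> omega)]
    simp
  · rw [if_neg h]
    rw [pySACloopB.eq_def, if_neg (by rw [hrdef]; split <;> omega)]
    have : cs.take r = cs := by
      apply List.take_of_length_le
      rw [hrdef]; split <;> omega
    rw [this]
termination_by cs.length
decreasing_by simpa using by omega

-- ===== VERDICT (by name: the statement is the Claim_ definition above) =====
theorem SAC_spec : Claim_equal_SAC := by
  intro txt _
  show SAC txt = SAC_alt txt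
  simp only [SAC, SAC_alt, pySACloopA_eq, List.nil_append, List.reverse_reverse]
  rw [pySACloopB_chunk3]
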